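-- pv_equiv track=rewrite | github.com/stefanv/cesium | mltsp/TCP/Algorithms/rpy2_classifiers.py | parse_arff_header
-- ===== SOURCE A (Python) =====
-- def parse_arff_header(arff_str='', ignore_attribs=[]):
--     """ Parse a given ARFF string, replace @attribute with @ignored for attributes in
--     ignore_attribs list (ala PARF data specification).
--
--     Return arff header string.
--     """
--     lines = arff_str.split('\n')
--     out_lines = []
--     for line in lines:
--         out_lines.append(line)
--         if '@data' in line.lower():
--             return out_lines
--     return None # shouldn't get here.
-- ===== SOURCE B (Python) =====
-- def parse_arff_header(arff_str='', ignore_attribs=[]):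
--     """Locate the first line containing '@data' (case-insensitive) and slice
--     the prefix up to and including it; None when absent."""
--     lines = arff_str.split('\n')
--     idx = next((i for i, line in enumerate(lines) if '@data' in line.lower()), None)
--     if idx is None:
--         return None
--     return lines[:idx + 1]
-- ===== Notes on version B (the rewrite author's own statement) =====
-- stated objective: simpler
-- what changed: Replaces the append-and-early-return accumulation loop with a locate-the-boundary-then-slice shape: find the index of the first '@data' line via next() over enumerate(), then return lines[:idx+1].
import Mathlib
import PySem

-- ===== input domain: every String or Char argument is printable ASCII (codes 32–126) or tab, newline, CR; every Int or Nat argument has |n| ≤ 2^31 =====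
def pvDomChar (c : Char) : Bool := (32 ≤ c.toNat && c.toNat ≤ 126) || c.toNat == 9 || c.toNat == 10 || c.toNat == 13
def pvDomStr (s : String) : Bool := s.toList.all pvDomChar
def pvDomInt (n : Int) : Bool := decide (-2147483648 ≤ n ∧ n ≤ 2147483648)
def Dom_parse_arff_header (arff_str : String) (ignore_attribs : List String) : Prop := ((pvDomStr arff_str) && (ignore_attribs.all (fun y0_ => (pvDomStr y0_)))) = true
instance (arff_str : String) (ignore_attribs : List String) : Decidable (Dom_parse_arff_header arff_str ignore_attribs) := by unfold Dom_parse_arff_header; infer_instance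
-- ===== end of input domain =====

-- B replaces A's append-and-early-return loop with locate-first-'@data'-index-then-slice (objective: simpler).
-- ===== PORT A =====
-- s.split('\n'): sep is the nonempty literal "\n", so split? always returns some; getD is exact here.
def pvLines (s : String) : List String := (PySem.Str.split? s "\n").getD []

def pvA_loop (lines : List String) (out_lines : List String) : Option (List String) :=
  match lines with
  | [] => none            -- shouldn't get here.
  | line :: rest =>
    let out_lines := out_lines ++ [line]
    if PySem.Str.isIn "@data" (PySem.Str.lower line) then some out_lines
    else pvA_loop rest out_lines

def parse_arff_header (arff_str : String) (ignore_attribs : List String) : Option (List String) :=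
  pvA_loop (pvLines arff_str) []

-- ===== PORT B =====
def parse_arff_header_alt (arff_str : String) (ignore_attribs : List String) : Option (List String) :=
  let lines := pvLines arff_str
  match (PySem.List.enumerate lines).find? (fun p => PySem.Str.isIn "@data" (PySem.Str.lower p.2)) with
  | none => none
  | some (i, _) => some (PySem.List.slice lines none (some (i + 1)))

-- ===== PRECONDITION & SPEC =====
def Spec_parse_arff_header (arff_str : String) (ignore_attribs : List String) (out : Option (List String)) : Prop := out = parse_arff_header_alt arff_str ignore_attribs
instance (arff_str : String) (ignore_attribs : List String) (out : Option (List String)) : Decidable (Spec_parse_arff_header arff_str ignore_attribs out) := by unfold Spec_parse_arff_header; infer_instance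

-- ===== CLAIM (what is proved, stated in full; the proofs are below) =====
def Claim_equal_parse_arff_header : Prop := ∀ (arff_str : String) (ignore_attribs : List String), Dom_parse_arff_header arff_str ignore_attribs → Spec_parse_arff_header arff_str ignore_attribs (parse_arff_header arff_str ignore_attribs)

-- ===== LEMMAS AND PROOFS =====

def pvPred (l : String) : Bool := PySem.Str.isIn "@data" (PySem.Str.lower l)

theorem pv_find_enum (lines : List String) (k : Int) :
    ((PySem.List.enumerate lines k).find? (fun p => pvPred p.2)).map Prod.fst
      = (lines.findIdx? pvPred).map (fun j => k + (j : Int)) := by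
  induction lines generalizing k with
  | nil => simp [PySem.List.enumerate_nil]
  | cons l rest ih =>
    simp only [PySem.List.enumerate_cons, List.find?_cons, List.findIdx?_cons]
    by_cases h : pvPred l
    · simp [h]
    · simp only [h, Bool.false_eq_true, if_false, ih]
      cases rest.findIdx? pvPred <;> simp
      omega

theorem pv_loop_eq (lines out : List String) :
    pvA_loop lines out = (lines.findIdx? pvPred).map (fun j => out ++ lines.take (j + 1)) := by
  induction lines generalizing out with
  | nil => simp [pvA_loop]
  | cons l rest ih =>
    simp only [pvA_loop, List.findIdx?_cons]
    by_cases h : pvPred l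
    · simp [pvPred] at h; simp [h, pvPred]
    · simp [pvPred] at h
      simp [h, pvPred, ih, List.append_assoc, List.take_succ_cons, Function.comp_def]

-- ===== VERDICT (by name: the statement is the Claim_ definition above) =====
theorem parse_arff_header_spec : Claim_equal_parse_arff_header := by
  intro arff_str ignore_attribs _
  unfold Spec_parse_arff_header parse_arff_header
  have halt : parse_arff_header_alt arff_str ignore_attribs =
      (match ((PySem.List.enumerate (pvLines arff_str)).find? (fun p => pvPred p.2)) with
       | none => none
       | some (i, _) => some (PySem.List.slice (pvLines arff_str) none (some (i + 1)))) := rfl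
  rw [halt, pv_loop_eq]
  have hfind := pv_find_enum (pvLines arff_str) 0
  cases hJ : (pvLines arff_str).findIdx? pvPred with
  | none =>
    rw [hJ] at hfind
    have hfn : List.find? (fun p => pvPred p.2) (PySem.List.enumerate (pvLines arff_str)) = none := by
      cases hE : List.find? (fun p => pvPred p.2) (PySem.List.enumerate (pvLines arff_str)) with
      | none => rfl
      | some p => rw [hE] at hfind; simp at hfind
    rw [hfn]; rfl
  | some j =>
    rw [hJ] at hfind
    obtain ⟨⟨i, x⟩, hF, hfst⟩ := Option.map_eq_some_iff.mp hfind
    have hi : i = (j : Int) := by simpa using hfst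
    rw [hF, hi]
    have hc : ((j : Int) + 1) = ((j + 1 : Nat) : Int) := by push_cast; ring
    simp only [hc, PySem.List.slice_to_natCast, Option.map_some, List.nil_append]
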